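-- pv_equiv track=rewrite | github.com/jackalsin/Python | 15112/Homework/hw2_save_at_2145_Sept_11.py | isCarolNumber
-- ===== SOURCE A (Python) =====
-- def isCarolNumber(n):
--     k=0
--     while ((2**k - 1)**2 - 2)<=n:
--         guess=((2**k - 1)**2 - 2)
--         if guess==n:
--             return True
--         k+=1
--     return False
-- ===== SOURCE B (Python) =====
-- def isCarolNumber(n):
--     s = n + 2
--     if s < 0:
--         return False
--     k = (s.bit_length() + 1) // 2
--     return (2 ** k - 1) ** 2 == s
-- ===== Notes on version B (the rewrite author's own statement) =====
-- stated objective: faster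
-- what changed: Replaced the loop that generates successive Carol numbers and compares each against the input by a constant-time closed-form test: shift the input, derive the candidate exponent from its bit length, and check the single candidate Carol value.
import Mathlib
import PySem

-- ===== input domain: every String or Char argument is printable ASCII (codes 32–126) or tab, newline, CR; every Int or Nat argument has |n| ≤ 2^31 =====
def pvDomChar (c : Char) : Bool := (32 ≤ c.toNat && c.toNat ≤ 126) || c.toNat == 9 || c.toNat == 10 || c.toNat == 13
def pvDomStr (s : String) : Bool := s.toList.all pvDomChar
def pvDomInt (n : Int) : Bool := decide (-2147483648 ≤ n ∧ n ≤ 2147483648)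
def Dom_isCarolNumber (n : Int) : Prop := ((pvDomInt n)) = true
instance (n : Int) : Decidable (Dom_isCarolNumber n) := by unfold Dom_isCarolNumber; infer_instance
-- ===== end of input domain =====

-- B replaces A's generate-and-compare loop by a closed-form bit-length test (faster).

-- ===== PORT A =====
-- termination lemma for A's while loop: the candidate (2^k-1)^2 grows strictly with k
theorem carolCand_strict (k : Nat) : ((2:Int) ^ k - 1) ^ 2 < ((2:Int) ^ (k + 1) - 1) ^ 2 := by
  have h1 : (1:Int) ≤ 2 ^ k := one_le_pow₀ (by norm_num)
  have h2 : (2:Int) ^ (k + 1) = 2 ^ k * 2 := pow_succ 2 k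
  nlinarith

def carolLoop (n : Int) (k : Nat) : Bool :=
  if ((2:Int) ^ k - 1) ^ 2 - 2 ≤ n then
    if ((2:Int) ^ k - 1) ^ 2 - 2 = n then true
    else carolLoop n (k + 1)
  else false
termination_by (n + 2 - ((2:Int) ^ k - 1) ^ 2).toNat
decreasing_by
  have := carolCand_strict k
  omega

def isCarolNumber (n : Int) : Bool := carolLoop n 0

-- ===== PORT B =====
def isCarolNumber_alt (n : Int) : Bool :=
  let s := n + 2
  if s < 0 then false
  else
    let k := (PySem.Int.bitLength s + 1) / 2
    ((2:Int) ^ k - 1) ^ 2 == s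

-- ===== PRECONDITION & SPEC =====
def Spec_isCarolNumber (n : Int) (out : Bool) : Prop := out = isCarolNumber_alt n
instance (n : Int) (out : Bool) : Decidable (Spec_isCarolNumber n out) := by unfold Spec_isCarolNumber; infer_instance

-- ===== CLAIM (what is proved, stated in full; the proofs are below) =====
def Claim_equal_isCarolNumber : Prop := ∀ (n : Int), Dom_isCarolNumber n → Spec_isCarolNumber n (isCarolNumber n)

-- ===== LEMMAS AND PROOFS =====

theorem carolCand_mono {k j : Nat} (h : k ≤ j) :
    ((2:Int) ^ k - 1) ^ 2 ≤ ((2:Int) ^ j - 1) ^ 2 := by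
  have h1 : (1:Int) ≤ 2 ^ k := one_le_pow₀ (by norm_num)
  have h2 : (2:Int) ^ k ≤ 2 ^ j := pow_le_pow_right₀ (by norm_num) h
  nlinarith

theorem carolLoop_iff (n : Int) (k : Nat) :
    carolLoop n k = true ↔ ∃ j, k ≤ j ∧ ((2:Int) ^ j - 1) ^ 2 - 2 = n := by
  fun_induction carolLoop n k with
  | case1 k hle heq =>
    simp only [true_iff]
    exact ⟨k, le_refl k, heq⟩
  | case2 k hle hne ih =>
    rw [ih]
    constructor
    · rintro ⟨j, hj, hjn⟩
      exact ⟨j, Nat.le_of_succ_le hj, hjn⟩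
    · rintro ⟨j, hj, hjn⟩
      refine ⟨j, ?_, hjn⟩
      rcases Nat.lt_or_ge k j with h | h
      · exact h
      · exact absurd hjn (by rw [Nat.le_antisymm h hj]; exact hne)
  | case3 k hle =>
    simp only [Bool.false_eq_true, false_iff]
    rintro ⟨j, hj, hjn⟩
    exact hle (by have := carolCand_mono hj; omega)

-- bit-length of (2^j-1)^2 lies in [2j-1, 2j] for j ≥ 1, so (bitLength+1)/2 recovers j
theorem bitLength_carol (j : Nat) (hj : 1 ≤ j) :
    (PySem.Int.bitLength (((2:Int) ^ j - 1) ^ 2) + 1) / 2 = j := by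
  set m : Nat := 2 ^ j - 1 with hm
  have h1 : (1:Nat) ≤ 2 ^ j := Nat.one_le_two_pow
  have hcast : ((2:Int) ^ j - 1) ^ 2 = ((m ^ 2 : Nat) : Int) := by
    push_cast [hm, Nat.cast_sub h1]; ring
  have hm1 : 1 ≤ m := by
    have : 2 ^ 1 ≤ 2 ^ j := Nat.pow_le_pow_right (by norm_num) hj
    omega
  have hne : (((m ^ 2 : Nat)) : Int) ≠ 0 := by
    have : 1 ≤ m ^ 2 := Nat.one_le_pow _ _ hm1
    exact_mod_cast by omega
  set b := PySem.Int.bitLength (((m ^ 2 : Nat)) : Int) with hb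
  have hub : m ^ 2 < 2 ^ b := by
    have := PySem.Int.lt_two_pow_bitLength (((m ^ 2 : Nat)) : Int)
    simpa using this
  have hlb : 2 ^ (b - 1) ≤ m ^ 2 := by
    have := PySem.Int.two_pow_bitLength_le (((m ^ 2 : Nat)) : Int) hne
    simpa using this
  -- bounds on m^2: 2^(2j-2) ≤ m^2 < 2^(2j)
  have hmu : m < 2 ^ j := by omega
  have hml : 2 ^ (j - 1) ≤ m := by
    have : 2 ^ j = 2 ^ (j - 1) * 2 := by
      rw [← pow_succ]; congr 1; omega
    omega
  have hsu : m ^ 2 < 2 ^ (2 * j) := by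
    calc m ^ 2 = m * m := sq m
    _ < 2 ^ j * 2 ^ j := by exact Nat.mul_lt_mul_of_lt_of_lt hmu hmu
    _ = 2 ^ (2 * j) := by rw [← pow_add]; ring_nf
  have hsl : 2 ^ (2 * j - 2) ≤ m ^ 2 := by
    calc 2 ^ (2 * j - 2) = 2 ^ (j - 1) * 2 ^ (j - 1) := by rw [← pow_add]; congr 1; omega
    _ ≤ m * m := Nat.mul_le_mul hml hml
    _ = m ^ 2 := (sq m).symm
  -- pin b between 2j-1 and 2j
  have hb_le : b ≤ 2 * j := by
    by_contra h
    have : 2 ^ (2 * j) ≤ 2 ^ (b - 1) := Nat.pow_le_pow_right (by norm_num) (by omega)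
    omega
  have hb_ge : 2 * j - 1 ≤ b := by
    by_contra h
    have : 2 ^ b ≤ 2 ^ (2 * j - 2) := Nat.pow_le_pow_right (by norm_num) (by omega)
    omega
  rw [hcast]
  omega

theorem alt_iff (n : Int) :
    isCarolNumber_alt n = true ↔ ∃ j : Nat, ((2:Int) ^ j - 1) ^ 2 - 2 = n := by
  unfold isCarolNumber_alt
  simp only []
  split
  · rename_i hneg
    simp only [Bool.false_eq_true, false_iff]
    rintro ⟨j, hjn⟩
    have : (0:Int) ≤ ((2:Int) ^ j - 1) ^ 2 := sq_nonneg _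
    omega
  · rename_i hpos
    rw [beq_iff_eq]
    constructor
    · intro h; exact ⟨(PySem.Int.bitLength (n + 2) + 1) / 2, by omega⟩
    · rintro ⟨j, hjn⟩
      rcases Nat.eq_zero_or_pos j with hj0 | hj1
      · subst hj0
        have hn : n = -2 := by norm_num at hjn; omega
        subst hn; decide
      · have hs : n + 2 = ((2:Int) ^ j - 1) ^ 2 := by omega
        rw [hs, bitLength_carol j hj1]

-- ===== VERDICT (by name: the statement is the Claim_ definition above) =====
theorem isCarolNumber_spec : Claim_equal_isCarolNumber := by
  intro n _
  unfold Spec_isCarolNumber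
  rw [Bool.eq_iff_iff]
  rw [show isCarolNumber n = carolLoop n 0 from rfl, carolLoop_iff, alt_iff]
  constructor
  · rintro ⟨j, _, h⟩; exact ⟨j, h⟩
  · rintro ⟨j, h⟩; exact ⟨j, Nat.zero_le j, h⟩
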